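-- pv_equiv track=rewrite | github.com/neatbasis/SemanticNG | scripts/ci/validate_program_sync.py | _extract_workflow_paths
-- ===== SOURCE A (Python) =====
-- def _extract_workflow_paths(workflow_text: str) -> list[list[str]]:
--     blocks: list[list[str]] = []
--     lines = workflow_text.splitlines()
--     idx = 0
--     while idx < len(lines):
--         line = lines[idx]
--         stripped = line.strip()
--         if stripped != "paths:":
--             idx += 1
--             continue
--         indent = len(line) - len(line.lstrip(" "))
--         idx += 1
--         values: list[str] = []
--         while idx < len(lines):
--             candidate = lines[idx]
--             cstrip = candidate.strip()
--             cindent = len(candidate) - len(candidate.lstrip(" "))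
--             if not cstrip:
--                 idx += 1
--                 continue
--             if cindent <= indent:
--                 break
--             if cstrip.startswith("- "):
--                 value = cstrip[2:].strip().strip("'").strip('"')
--                 values.append(value)
--                 idx += 1
--                 continue
--             break
--         blocks.append(values)
--     return blocks
-- ===== SOURCE B (Python) =====
-- def _extract_workflow_paths(workflow_text: str) -> list[list[str]]:
--     blocks: list[list[str]] = []
--     in_block = False
--     block_indent = 0
--     values: list[str] = []
--     for line in workflow_text.splitlines():
--         stripped = line.strip()
--         indent = len(line) - len(line.lstrip(" "))
--         if in_block:
--             if not stripped:
--                 continue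
--             if indent > block_indent and stripped.startswith("- "):
--                 values.append(stripped[2:].strip().strip("'").strip('"'))
--                 continue
--             blocks.append(values)
--             in_block = False
--         if stripped == "paths:":
--             in_block = True
--             block_indent = indent
--             values = []
--     if in_block:
--         blocks.append(values)
--     return blocks
-- ===== Notes on version B (the rewrite author's own statement) =====
-- stated objective: simpler
-- what changed: A's nested index-driven while-loops (outer header scan plus inner block scan sharing a mutable idx) are replaced by one flat pass over the lines with a small state machine (in_block flag, block indent, current values), flushing the open block at close or EOF.
import Mathlib
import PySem

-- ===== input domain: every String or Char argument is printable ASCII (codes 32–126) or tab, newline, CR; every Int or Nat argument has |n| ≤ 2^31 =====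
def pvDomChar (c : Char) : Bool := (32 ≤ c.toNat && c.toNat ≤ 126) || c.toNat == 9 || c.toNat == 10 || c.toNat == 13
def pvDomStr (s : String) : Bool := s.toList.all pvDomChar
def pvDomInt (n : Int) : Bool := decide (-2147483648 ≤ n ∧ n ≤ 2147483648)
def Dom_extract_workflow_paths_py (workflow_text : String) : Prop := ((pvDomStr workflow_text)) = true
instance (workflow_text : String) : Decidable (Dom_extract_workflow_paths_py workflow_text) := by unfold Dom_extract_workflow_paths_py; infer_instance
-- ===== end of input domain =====

-- B replaces A's nested index-driven while-loops with a single-pass state machine over the lines (objective: simpler).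

-- shared small helpers (same expressions both Pythons compute on each line)
-- len(line) - len(line.lstrip(" ")): number of leading spaces (lstrip(" ") drops exactly the leading ' ' characters, so this is exact)
def pvIndent (line : String) : Nat := (line.toList.takeWhile (· == ' ')).length

-- cstrip[2:].strip().strip("'").strip('"')
def pvParseVal (cstrip : String) : String :=
  PySem.Str.stripChars (PySem.Str.stripChars (PySem.Str.strip (PySem.Str.slice cstrip (some 2) none)) "'") "\""

-- ===== PORT A =====
-- inner while-loop of A: consumes lines, accumulating values, returns (values, remaining lines)
def pvAInner (indent : Nat) : List String → List String → List String × List String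
  | [], vals => (vals, [])
  | c :: rest, vals =>
    let cs := PySem.Str.strip c
    let ci := pvIndent c
    if cs = "" then pvAInner indent rest vals
    else if ci ≤ indent then (vals, c :: rest)
    else if PySem.Str.startswith cs "- " then pvAInner indent rest (vals ++ [pvParseVal cs])
    else (vals, c :: rest)

theorem pvAInner_len (indent : Nat) (ls vals : List String) :
    (pvAInner indent ls vals).2.length ≤ ls.length := by
  induction ls generalizing vals with
  | nil => simp [pvAInner]
  | cons c rest ih =>
    simp only [pvAInner, List.length_cons]
    split_ifs
    · exact Nat.le_succ_of_le (ih vals)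
    · simp
    · exact Nat.le_succ_of_le (ih _)
    · simp

-- outer while-loop of A
def pvAOuter : List String → List (List String)
  | [] => []
  | line :: rest =>
    if PySem.Str.strip line ≠ "paths:" then pvAOuter rest
    else
      let p := pvAInner (pvIndent line) rest []
      p.1 :: pvAOuter p.2
termination_by ls => ls.length
decreasing_by
  · simp
  · exact Nat.lt_succ_of_le (pvAInner_len (pvIndent line) rest [])

def extract_workflow_paths_py (workflow_text : String) : List (List String) :=
  pvAOuter (PySem.Str.splitlines workflow_text)

-- ===== PORT B =====
-- single flat loop with state (in_block, block_indent, values, blocks)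
def pvBLoop : List String → Bool → Nat → List String → List (List String) → List (List String)
  | [], inb, _, vals, blocks => if inb then blocks ++ [vals] else blocks
  | line :: rest, inb, bind, vals, blocks =>
    let s := PySem.Str.strip line
    let ind := pvIndent line
    if inb then
      if s = "" then pvBLoop rest true bind vals blocks
      else if bind < ind ∧ PySem.Str.startswith s "- " = true then
        pvBLoop rest true bind (vals ++ [pvParseVal s]) blocks
      else if s = "paths:" then pvBLoop rest true ind [] (blocks ++ [vals])
      else pvBLoop rest false bind vals (blocks ++ [vals])
    else
      if s = "paths:" then pvBLoop rest true ind [] blocks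
      else pvBLoop rest false bind vals blocks

def extract_workflow_paths_py_alt (workflow_text : String) : List (List String) :=
  pvBLoop (PySem.Str.splitlines workflow_text) false 0 [] []

-- ===== PRECONDITION & SPEC =====
def Spec_extract_workflow_paths_py (workflow_text : String) (out : List (List String)) : Prop := out = extract_workflow_paths_py_alt workflow_text
instance (workflow_text : String) (out : List (List String)) : Decidable (Spec_extract_workflow_paths_py workflow_text out) := by unfold Spec_extract_workflow_paths_py; infer_instance

-- ===== CLAIM (what is proved, stated in full; the proofs are below) =====
def Claim_equal_extract_workflow_paths_py : Prop := ∀ (workflow_text : String), Dom_extract_workflow_paths_py workflow_text → Spec_extract_workflow_paths_py workflow_text (extract_workflow_paths_py workflow_text)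

-- ===== LEMMAS AND PROOFS =====

theorem pvAOuter_cons (line : String) (rest : List String) :
    pvAOuter (line :: rest) =
      if PySem.Str.strip line ≠ "paths:" then pvAOuter rest
      else (pvAInner (pvIndent line) rest []).1 :: pvAOuter (pvAInner (pvIndent line) rest []).2 := by
  rw [pvAOuter]

-- loop correspondence: B's flat loop with in_block=false runs A's outer loop,
-- and with in_block=true runs A's inner loop followed by the outer loop on the rest
theorem pvLoop_eq (n : Nat) : ∀ ls : List String, ls.length ≤ n →
    (∀ (bind : Nat) (vals : List String) (blocks : List (List String)),
        pvBLoop ls false bind vals blocks = blocks ++ pvAOuter ls) ∧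
    (∀ (ind : Nat) (vals : List String) (blocks : List (List String)),
        pvBLoop ls true ind vals blocks =
          blocks ++ (pvAInner ind ls vals).1 :: pvAOuter (pvAInner ind ls vals).2) := by
  induction n with
  | zero =>
    intro ls h
    have : ls = [] := List.eq_nil_of_length_eq_zero (Nat.le_zero.mp h)
    subst this
    constructor <;> intros <;> simp [pvBLoop, pvAOuter, pvAInner]
  | succ n ih =>
    intro ls h
    match ls with
    | [] => constructor <;> intros <;> simp [pvBLoop, pvAOuter, pvAInner]
    | line :: rest =>
      have hr : rest.length ≤ n := by simpa using Nat.le_of_succ_le_succ (by simpa using h)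
      obtain ⟨ihF, ihT⟩ := ih rest hr
      constructor
      · intro bind vals blocks
        by_cases hp : PySem.Str.strip line = "paths:"
        · simp only [pvBLoop, pvAOuter_cons, hp]
          simp [ihT]
        · simp only [pvBLoop, pvAOuter_cons]
          simp [hp, ihF]
      · intro ind vals blocks
        by_cases h0 : PySem.Str.strip line = ""
        · simp only [pvBLoop, pvAInner]
          simp [h0, ihT]
        · by_cases hlt : ind < pvIndent line
          · by_cases hsw : PySem.Chars.startswith (PySem.Chars.strip line.toList) ['-', ' '] = true
            · simp only [pvBLoop, pvAInner]
              simp [h0, hlt, Nat.not_le.mpr hlt, hsw, PySem.Str.startswith, ihT]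
            · by_cases hp : PySem.Str.strip line = "paths:"
              · have hsw' : PySem.Chars.startswith (PySem.Chars.strip line.toList) ['-', ' '] = false := by
                  simpa using hsw
                simp only [pvBLoop, pvAInner]
                simp [hlt, Nat.not_le.mpr hlt, PySem.Str.startswith, hp, pvAOuter_cons, ihT, show PySem.Chars.startswith ['p','a','t','h','s',':'] ['-',' '] = false from by decide]
              · have hsw' : PySem.Chars.startswith (PySem.Chars.strip line.toList) ['-', ' '] = false := by
                  simpa using hsw
                simp only [pvBLoop, pvAInner]
                simp [h0, hlt, Nat.not_le.mpr hlt, hsw', PySem.Str.startswith, hp, pvAOuter_cons, ihF]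
          · have hle : pvIndent line ≤ ind := Nat.not_lt.mp hlt
            by_cases hp : PySem.Str.strip line = "paths:"
            · simp only [pvBLoop, pvAInner]
              simp [hlt, hle, hp, pvAOuter_cons, ihT, show PySem.Chars.startswith ['p','a','t','h','s',':'] ['-',' '] = false from by decide]
            · simp only [pvBLoop, pvAInner]
              simp [h0, hlt, hle, hp, pvAOuter_cons, ihF]

-- ===== VERDICT (by name: the statement is the Claim_ definition above) =====
theorem extract_workflow_paths_py_spec : Claim_equal_extract_workflow_paths_py := by
  intro wt _
  unfold Spec_extract_workflow_paths_py extract_workflow_paths_py extract_workflow_paths_py_alt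
  have := (pvLoop_eq (PySem.Str.splitlines wt).length (PySem.Str.splitlines wt) le_rfl).1 0 [] []
  simp [this]
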